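-- pv_equiv track=rewrite | github.com/mereszd/aoc2019 | 04_02_sol.py | check_biggest_group
-- ===== SOURCE A (Python) =====
-- def check_biggest_group(value):
--     groups = []
--     count = 1
--     str_value = str(value)
--     for i in range(len(str_value)-1):
--         if str_value[i] == str_value[i+1]:
--             count += 1
--         else:
--             groups.append(count)
--             count = 1
--     groups.append(count)
--     if max(groups) == 2:
--         return True
--     elif 2 in groups and max(groups) != 2:
--         return True
--     return False
-- ===== SOURCE B (Python) =====
-- def check_biggest_group(value):
--     t = ' ' + str(value) + ' '
--     return any(p != c == d != e for p, c, d, e in zip(t, t[1:], t[2:], t[3:]))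
-- ===== Notes on version B (the rewrite author's own statement) =====
-- stated objective: idiomatic
-- what changed: B never extracts runs or counts anything: it pads the string with sentinel spaces and tests sliding four-character windows (via zip of shifted slices) for an isolated doubled character p != c == d != e, instead of A's counter loop that builds a list of run lengths and analyses it with max and membership.
import Mathlib
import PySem

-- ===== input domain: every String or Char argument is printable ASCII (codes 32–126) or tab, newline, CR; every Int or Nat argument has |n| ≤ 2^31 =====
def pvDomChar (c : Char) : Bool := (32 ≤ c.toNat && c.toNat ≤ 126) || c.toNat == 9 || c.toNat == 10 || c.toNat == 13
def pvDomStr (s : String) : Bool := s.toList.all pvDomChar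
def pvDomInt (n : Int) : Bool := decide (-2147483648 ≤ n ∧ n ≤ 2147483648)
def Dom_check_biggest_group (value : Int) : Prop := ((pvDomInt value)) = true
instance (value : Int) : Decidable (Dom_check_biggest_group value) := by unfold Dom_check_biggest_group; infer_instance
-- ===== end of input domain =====

-- B pads the digit string with sentinel spaces and tests sliding four-character windows
-- (zip of shifted slices) for an isolated doubled character, instead of A's counter loop
-- that builds a run-length list and analyses it with max and membership ("idiomatic").

-- ===== PORT A =====
-- loop body of `for i in range(len(str_value)-1)` over state (groups, count)
def pvAStep (s : List Char) (gc : List Int × Int) (i : Int) : List Int × Int :=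
  if PySem.List.pyGet? s i = PySem.List.pyGet? s (i + 1) then (gc.1, gc.2 + 1)
  else (gc.1 ++ [gc.2], 1)

def check_biggest_group (value : Int) : Bool :=
  let str_value := PySem.Int.toChars value
  let st := (PySem.List.pyRange 0 ((str_value.length : Int) - 1) 1).foldl (pvAStep str_value) ([], 1)
  let groups := st.1 ++ [st.2]
  match PySem.List.max? groups (fun x => x) with
  | none => false   -- unreachable: groups is nonempty
  | some m =>
    if m = 2 then true
    else if groups.contains 2 ∧ m ≠ 2 then true
    else false

-- ===== PORT B =====
-- Source B: t = ' ' + str(value) + ' ';  any(p != c == d != e for p,c,d,e in zip(t,t[1:],t[2:],t[3:]))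
-- (Python's 4-ary zip is encoded as the nested List.zip of the same four shifted slices)
def check_biggest_group_alt (value : Int) : Bool :=
  let t := ' ' :: (PySem.Int.toChars value ++ [' '])
  let quads := (t.zip (PySem.List.slice t (some 1) none)).zip
      ((PySem.List.slice t (some 2) none).zip (PySem.List.slice t (some 3) none))
  quads.any (fun q => q.1.1 != q.1.2 && q.1.2 == q.2.1 && q.2.1 != q.2.2)

-- ===== PRECONDITION & SPEC =====
def Spec_check_biggest_group (value : Int) (out : Bool) : Prop := out = check_biggest_group_alt value
instance (value : Int) (out : Bool) : Decidable (Spec_check_biggest_group value out) := by unfold Spec_check_biggest_group; infer_instance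

-- ===== CLAIM (what is proved, stated in full; the proofs are below) =====
def Claim_equal_check_biggest_group : Prop := ∀ (value : Int), Dom_check_biggest_group value → Spec_check_biggest_group value (check_biggest_group value)

-- ===== LEMMAS AND PROOFS =====

-- A's index loop rewritten as structural recursion on the character list
def pvChain : List Char → List Int × Int → List Int × Int
  | [], gc => gc
  | [_], gc => gc
  | a :: b :: t, gc =>
      pvChain (b :: t) (if a = b then (gc.1, gc.2 + 1) else (gc.1 ++ [gc.2], 1))

-- run lengths of the suffix, with c the length of the current run so far
def pvCore : List Char → Int → List Int
  | [], c => [c]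
  | [_], c => [c]
  | a :: b :: t, c => if a = b then pvCore (b :: t) (c + 1) else c :: pvCore (b :: t) 1

lemma pvGet_cons (a : Char) (s : List Char) (i : Int) (hi : 0 ≤ i) :
    PySem.List.pyGet? (a :: s) (i + 1) = PySem.List.pyGet? s i := by
  unfold PySem.List.pyGet? PySem.List.pyIdx?
  rw [if_pos (by omega : (0:Int) ≤ i + 1), if_pos hi]
  by_cases h2 : i < (s.length : Int)
  · rw [if_pos (by simp; omega), if_pos h2]
    simp only [Option.bind_some]
    have ht : (i + 1).toNat = i.toNat + 1 := by omega
    rw [ht, List.getElem?_cons_succ]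
  · rw [if_neg (by simp; omega), if_neg h2]
    simp

lemma pvGet_zero (a : Char) (s : List Char) :
    PySem.List.pyGet? (a :: s) 0 = some a := by
  have h : (0:Int) < ((a :: s).length : Int) := by simp only [List.length_cons]; omega
  unfold PySem.List.pyGet? PySem.List.pyIdx?
  rw [if_pos (by omega : (0:Int) ≤ 0), if_pos h]
  simp

lemma pvShift (f g : List Int × Int → Int → List Int × Int)
    (h : ∀ st (i : Int), 0 ≤ i → f st (i + 1) = g st i) :
    ∀ (m : Nat) (st : List Int × Int),
      (PySem.List.pyRange 1 ((m : Int) + 1) 1).foldl f st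
        = (PySem.List.pyRange 0 (m : Int) 1).foldl g st := by
  intro m
  induction m with
  | zero => intro st; simp [PySem.List.pyRange]
  | succ k ih =>
    intro st
    have h1 : PySem.List.pyRange 1 (((k : Int) + 1) + 1) 1
        = PySem.List.pyRange 1 ((k : Int) + 1) 1 ++ [(k : Int) + 1] :=
      PySem.List.pyRange_one_succ_right (by omega)
    have h2 : PySem.List.pyRange 0 ((k : Int) + 1) 1
        = PySem.List.pyRange 0 (k : Int) 1 ++ [(k : Int)] :=
      PySem.List.pyRange_one_succ_right (by omega)
    have hk : ((k + 1 : Nat) : Int) = (k : Int) + 1 := by push_cast; ring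
    rw [hk, h1, h2, List.foldl_append, List.foldl_append, ih]
    simp [h _ (k : Int) (by omega)]

lemma pvFold_eq_chain :
    ∀ (s : List Char) (gc : List Int × Int),
      (PySem.List.pyRange 0 ((s.length : Int) - 1) 1).foldl (pvAStep s) gc = pvChain s gc := by
  intro s
  induction s with
  | nil => intro gc; simp [PySem.List.pyRange, pvChain]
  | cons a t ih =>
    intro gc
    cases t with
    | nil => rfl
    | cons b t' =>
      have hlen : (((a :: b :: t').length : Int) - 1) = ((b :: t').length : Int) := by
        simp only [List.length_cons]; push_cast; ring
      rw [hlen]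
      have hpos : (0 : Int) < ((b :: t').length : Int) := by simp
      rw [PySem.List.pyRange_one_cons hpos]
      simp only [List.foldl_cons]
      have hstep : pvAStep (a :: b :: t') gc 0
          = (if a = b then (gc.1, gc.2 + 1) else (gc.1 ++ [gc.2], 1)) := by
        unfold pvAStep
        rw [pvGet_zero, (by norm_num : (0:Int) + 1 = 0 + 1), pvGet_cons a _ 0 (by omega), pvGet_zero]
        simp
      rw [hstep]
      have h01 : (0 : Int) + 1 = 1 := by norm_num
      rw [h01]
      have hshift : ∀ st, (PySem.List.pyRange 1 (((b :: t').length : Int)) 1).foldl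
            (pvAStep (a :: b :: t')) st
          = (PySem.List.pyRange 0 (((b :: t').length : Int) - 1) 1).foldl (pvAStep (b :: t')) st := by
        intro st
        have hl : (((b :: t').length : Int)) = ((t'.length : Nat) : Int) + 1 := by simp
        rw [hl]
        have := pvShift (pvAStep (a :: b :: t')) (pvAStep (b :: t'))
          (by
            intro st' i hi
            unfold pvAStep
            rw [pvGet_cons a _ i hi, pvGet_cons a _ (i + 1) (by omega)])
          t'.length st
        rw [this]
        congr 1
        simp
      rw [hshift, ih]
      rfl

lemma pvChain_append :
    ∀ (s : List Char) (g : List Int) (c : Int),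
      (pvChain s (g, c)).1 ++ [(pvChain s (g, c)).2] = g ++ pvCore s c := by
  intro s
  induction s with
  | nil => intro g c; simp [pvChain, pvCore]
  | cons a t ih =>
    intro g c
    cases t with
    | nil => simp [pvChain, pvCore]
    | cons b t' =>
      by_cases hab : a = b
      · simp [pvChain, pvCore, hab, ih]
      · simp [pvChain, pvCore, hab, ih]

lemma pvCore_ne_nil : ∀ (s : List Char) (c : Int), pvCore s c ≠ [] := by
  intro s
  induction s with
  | nil => intro c; simp [pvCore]
  | cons a t ih =>
    intro c
    cases t with
    | nil => simp [pvCore]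
    | cons b t' =>
      by_cases hab : a = b
      · simp only [pvCore, if_pos hab]; exact ih (c + 1)
      · simp [pvCore, hab]

-- A returns exactly "2 occurs among the run lengths"
lemma pvA_eq_mem (s : List Char) :
    ((PySem.List.pyRange 0 ((s.length : Int) - 1) 1).foldl (pvAStep s) ([], 1) |> fun st =>
      match PySem.List.max? (st.1 ++ [st.2]) (fun x => x) with
      | none => false
      | some m => if m = 2 then true else if (st.1 ++ [st.2]).contains 2 ∧ m ≠ 2 then true else false)
      = decide ((2 : Int) ∈ pvCore s 1) := by
  rw [pvFold_eq_chain]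
  have hg : (pvChain s ([], 1)).1 ++ [(pvChain s ([], 1)).2] = pvCore s 1 := by
    simpa using pvChain_append s [] 1
  simp only [hg]
  cases hm : PySem.List.max? (pvCore s 1) (fun x => x) with
  | none =>
    exfalso
    exact pvCore_ne_nil s 1 ((PySem.List.max?_eq_none_iff _ _).mp hm)
  | some m =>
    have hmem := PySem.List.max?_mem hm
    by_cases h2 : m = 2
    · subst h2
      simp [hmem]
    · simp only [if_neg h2]
      by_cases hin : (2 : Int) ∈ pvCore s 1
      · simp [hin, h2]
      · simp [hin, h2]

lemma pvCore_run :
    ∀ (rest : List Char) (a : Char) (c : Int),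
      pvCore (a :: rest) c
        = (c + ((rest.takeWhile (· == a)).length : Int)) :: (match rest.dropWhile (· == a) with
            | [] => ([] : List Int)
            | l => pvCore l 1) := by
  intro rest
  induction rest with
  | nil => intro a c; simp [pvCore]
  | cons b t ih =>
    intro a c
    by_cases hab : a = b
    · subst hab
      have h : pvCore (a :: a :: t) c = pvCore (a :: t) (c + 1) := by simp [pvCore]
      rw [h, ih a (c + 1)]
      simp
      omega
    · have hba : ¬ (b == a) = true := by simp [beq_iff_eq]; exact fun h => hab h.symm
      have h : pvCore (a :: b :: t) c = c :: pvCore (b :: t) 1 := by simp [pvCore, hab]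
      rw [h]
      simp [List.takeWhile, List.dropWhile, hba]

-- the sliding four-window test as structural recursion (proof-side view of B's zip)
def pvQuad : List Char → Bool
  | p :: c :: d :: e :: rest =>
      (decide (p ≠ c) && decide (c = d) && decide (d ≠ e)) || pvQuad (c :: d :: e :: rest)
  | _ => false

lemma pvZip_eq_quad :
    ∀ (t : List Char),
      ((t.zip (t.drop 1)).zip ((t.drop 2).zip (t.drop 3))).any
        (fun q => q.1.1 != q.1.2 && q.1.2 == q.2.1 && q.2.1 != q.2.2) = pvQuad t := by
  intro t
  induction t using pvQuad.induct with
  | case1 p c d e rest ih =>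
    simp only [List.drop, List.zip_cons_cons, List.any_cons, pvQuad] at *
    rw [ih]
    congr 1
    simp [bne, beq_eq_decide, decide_not]
  | case2 t h =>
    cases t with
    | nil => rfl
    | cons a t =>
      cases t with
      | nil => rfl
      | cons b t =>
        cases t with
        | nil => rfl
        | cons c t =>
          cases t with
          | nil => rfl
          | cons d t => exact (h _ _ _ _ _ rfl).elim

-- walking through the interior of a run: windows (a,a,·,·) all fail on p ≠ c
lemma pvQuad_run :
    ∀ (t : List Char) (a : Char) (r' : List Char), (∀ c ∈ t, c = a) →
      pvQuad (a :: a :: (t ++ r')) = pvQuad (a :: r') := by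
  intro t
  induction t with
  | nil =>
    intro a r' _
    match r' with
    | [] => rfl
    | [_] => rfl
    | h :: h2 :: rr => simp [pvQuad]
  | cons b t' ih =>
    intro a r' hall
    have hb : b = a := hall b (by simp)
    subst hb
    simp only [List.cons_append]
    have h : pvQuad (b :: b :: b :: (t' ++ r')) = pvQuad (b :: b :: (t' ++ r')) := by
      cases htr : t' ++ r' with
      | nil => rfl
      | cons e l' => simp [pvQuad]
    rw [h]
    have := ih b r' (fun c hc => hall c (by simp [hc]))
    simpa using this

-- head of a non-empty dropWhile fails the predicate
lemma pvDropWhile_head {α : Type} (p : α → Bool) :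
    ∀ (l : List α) (x : α) (r : List α), l.dropWhile p = x :: r → p x = false := by
  intro l
  induction l with
  | nil => intro x r h; simp [List.dropWhile] at h
  | cons a t ih =>
    intro x r h
    by_cases ha : p a
    · rw [List.dropWhile_cons_of_pos ha] at h
      exact ih x r h
    · rw [List.dropWhile_cons_of_neg ha] at h
      cases h
      simpa using ha

-- main bridge: padded window scan = "2 is a run length", provided the previous char p
-- breaks the run and the right sentinel y occurs nowhere in the string
lemma pvQuad_core :
    ∀ (n : Nat) (rest : List Char), rest.length ≤ n →
      ∀ (a p y : Char), p ≠ a → y ∉ (a :: rest) →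
      pvQuad (p :: a :: (rest ++ [y])) = decide ((2 : Int) ∈ pvCore (a :: rest) 1) := by
  intro n
  induction n with
  | zero =>
    intro rest hlen a p y hpa hy
    have : rest = [] := List.length_eq_zero_iff.mp (Nat.le_zero.mp hlen)
    subst this
    simp [pvQuad, pvCore]
  | succ k ih =>
    intro rest hlen a p y hpa hy
    cases rest with
    | nil => simp [pvQuad, pvCore]
    | cons b rr =>
      by_cases hab : b = a
      · subst hab
        cases rr with
        | nil =>
          -- run of exactly 2 at the very end: the window (p,b,b,y) fires
          have hyb : b ≠ y := fun h => hy (by simp [h])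
          simp [pvQuad, pvCore, hpa, hyb]
        | cons c rr2 =>
          by_cases hca : c = b
          · -- run of length ≥ 3: the (p,b,b,b) window fails, walk through the run
            rw [hca]
            have hstep : pvQuad (p :: b :: (b :: b :: rr2 ++ [y]))
                = pvQuad (b :: b :: (b :: rr2 ++ [y])) := by
              simp [pvQuad]
            rw [hstep]
            simp only [List.cons_append]
            have hsplit : rr2 = rr2.takeWhile (· == b) ++ rr2.dropWhile (· == b) :=
              (List.takeWhile_append_dropWhile).symm
            have hall : ∀ x ∈ b :: rr2.takeWhile (· == b), x = b := by
              intro x hx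
              rcases List.mem_cons.mp hx with h | h
              · exact h
              · simpa using List.mem_takeWhile_imp h
            have hrun := pvQuad_run (b :: rr2.takeWhile (· == b)) b
              (rr2.dropWhile (· == b) ++ [y]) hall
            simp only [List.cons_append] at hrun
            rw [← List.append_assoc, ← hsplit] at hrun
            rw [hrun]
            have hcore : pvCore (b :: b :: b :: rr2) 1
                = (3 + ((rr2.takeWhile (· == b)).length : Int))
                    :: (match rr2.dropWhile (· == b) with
                        | [] => ([] : List Int)
                        | l => pvCore l 1) := by
              rw [pvCore_run (b :: b :: rr2) b 1]
              simp [List.takeWhile, List.dropWhile]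
              omega
            rw [hcore]
            cases hr2 : rr2.dropWhile (· == b) with
            | nil =>
              have h32 : ¬ ((2:Int) = 3 + ((rr2.takeWhile (· == b)).length : Int)) := by
                have : (0:Int) ≤ ((rr2.takeWhile (· == b)).length : Int) := by positivity
                omega
              simp [pvQuad, h32]
            | cons h0 rr3 =>
              have hh0 : h0 ≠ b := by
                have := pvDropWhile_head (· == b) rr2 h0 rr3 hr2
                simpa using this
              have hy3 : y ∉ (h0 :: rr3) := by
                intro hmem
                apply hy
                have : y ∈ rr2 := List.dropWhile_subset _ (hr2 ▸ hmem)
                simp [this]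
              have hlen3 : rr3.length ≤ k := by
                have h1 : (h0 :: rr3).length ≤ rr2.length := by
                  rw [← hr2]; exact List.length_dropWhile_le _ _
                simp only [List.length_cons] at h1 hlen
                omega
              have := ih rr3 hlen3 h0 b y (fun h => hh0 h.symm) hy3
              simp only [List.cons_append]
              rw [this]
              have h32 : ¬ ((2:Int) = 3 + ((rr2.takeWhile (· == b)).length : Int)) := by
                have : (0:Int) ≤ ((rr2.takeWhile (· == b)).length : Int) := by positivity
                omega
              simp [h32]
          · -- run of exactly 2 followed by a different char: the window fires
            have hbc : ¬ b = c := fun h => hca h.symm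
            have hwin : pvQuad (p :: b :: (b :: c :: rr2 ++ [y])) = true := by
              simp [pvQuad, hpa, hbc]
            rw [hwin]
            have hmem : (2 : Int) ∈ pvCore (b :: b :: c :: rr2) 1 := by
              have h1 : pvCore (b :: b :: c :: rr2) 1 = pvCore (b :: c :: rr2) 2 := by
                simp [pvCore]
              have h2 : pvCore (b :: c :: rr2) 2 = 2 :: pvCore (c :: rr2) 1 := by
                simp [pvCore, hbc]
              rw [h1, h2]; simp
            simp [hmem]
      · -- run of length 1: the (p,a,b,·) window fails on c = d
        obtain ⟨e, l', he⟩ : ∃ e l', rr ++ [y] = e :: l' := by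
          cases rr <;> exact ⟨_, _, rfl⟩
        have hya : y ∉ (b :: rr) := fun h => hy (by simp at h ⊢; tauto)
        have hba : ¬ a = b := fun h => hab h.symm
        have hstep : pvQuad (p :: a :: (b :: rr ++ [y])) = pvQuad (a :: (b :: rr ++ [y])) := by
          simp only [List.cons_append, he, pvQuad]
          simp [hba]
        rw [hstep]
        have hlen2 : rr.length ≤ k := by
          simp only [List.length_cons] at hlen
          omega
        have := ih rr hlen2 b a y (fun h => hab h.symm) hya
        rw [List.cons_append, this]
        have hcore : pvCore (a :: b :: rr) 1 = 1 :: pvCore (b :: rr) 1 := by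
          simp [pvCore, hba]
        rw [hcore]
        simp

-- every character of str(value) is '-' or a decimal digit, hence never the sentinel ' '
lemma pvDigits_no_space : ∀ (f n : Nat) (ds : List Char), ' ' ∈ Nat.toDigitsCore 10 f n ds → ' ' ∈ ds := by
  intro f
  induction f with
  | zero => intro n ds h; simpa [Nat.toDigitsCore] using h
  | succ g ih =>
    intro n ds h
    have hd : Nat.digitChar (n % 10) ≠ ' ' := by
      have hlt : n % 10 < 10 := Nat.mod_lt _ (by omega)
      exact (by decide : ∀ m, m < 10 → Nat.digitChar m ≠ ' ') (n % 10) hlt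
    simp only [Nat.toDigitsCore] at h
    by_cases hz : n / 10 = 0
    · rw [if_pos hz] at h
      simp at h
      rcases h with h | h
      · exact absurd h.symm hd
      · simpa using h
    · rw [if_neg hz] at h
      have := ih (n / 10) (Nat.digitChar (n % 10) :: ds) h
      simp at this
      rcases this with h2 | h2
      · exact absurd h2.symm hd
      · simpa using h2

lemma pvSpace_not_mem (v : Int) : ' ' ∉ PySem.Int.toChars v := by
  intro h
  have hmain : ∀ n : Nat, ' ' ∉ Nat.toDigits 10 n := by
    intro n hn
    have := pvDigits_no_space (n + 1) n [] (by simpa [Nat.toDigits] using hn)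
    simp at this
  unfold PySem.Int.toChars at h
  by_cases hv : v < 0
  · rw [if_pos hv] at h
    rcases List.mem_cons.mp h with h | h
    · exact absurd h (by decide)
    · exact hmain _ h
  · rw [if_neg hv] at h
    exact hmain _ h

-- the three shifted slices in the port are plain drops
lemma pvSlice_drop1 (t : List Char) : PySem.List.slice t (some 1) none = t.drop 1 := by
  have := PySem.List.slice_from_natCast (xs := t) (a := 1)
  simpa using this

lemma pvSlice_drop2 (t : List Char) : PySem.List.slice t (some 2) none = t.drop 2 := by
  have := PySem.List.slice_from_natCast (xs := t) (a := 2)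
  simpa using this

lemma pvSlice_drop3 (t : List Char) : PySem.List.slice t (some 3) none = t.drop 3 := by
  have := PySem.List.slice_from_natCast (xs := t) (a := 3)
  simpa using this

-- B's port evaluated through the structural window scan
lemma pvAlt_eq_quad (value : Int) :
    check_biggest_group_alt value = pvQuad (' ' :: (PySem.Int.toChars value ++ [' '])) := by
  unfold check_biggest_group_alt
  simp only [pvSlice_drop1, pvSlice_drop2, pvSlice_drop3, pvZip_eq_quad]

-- ===== VERDICT (by name: the statement is the Claim_ definition above) =====
theorem check_biggest_group_spec : Claim_equal_check_biggest_group := by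
  intro value _
  unfold Spec_check_biggest_group check_biggest_group
  have hA := pvA_eq_mem (PySem.Int.toChars value)
  simp only at hA ⊢
  rw [hA, pvAlt_eq_quad]
  cases hs : PySem.Int.toChars value with
  | nil => norm_num [pvQuad, pvCore]
  | cons a rest =>
    have hsp : ' ' ∉ (a :: rest) := by rw [← hs]; exact pvSpace_not_mem value
    have hpa : (' ' : Char) ≠ a := fun h => hsp (List.mem_cons.mpr (Or.inl h))
    have := pvQuad_core rest.length rest (le_refl _) a ' ' ' ' hpa hsp
    simp only [List.cons_append] at this ⊢
    exact this.symm
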